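-- pv_equiv track=rewrite | github.com/ssss327/futures-bot | risk_management.py | check_correlation_risk
-- ===== SOURCE A (Python) =====
-- from typing import Dict, Tuple, List, Optional
--
-- def check_correlation_risk(new_symbol: str, active_symbols: List[str]) -> bool:
--     """
--     Check for correlation risk between symbols
--
--     Args:
--         new_symbol: Symbol for new position
--         active_symbols: List of currently active symbols
--
--     Returns:
--         True if correlation risk is acceptable
--     """
--     # Simple correlation check - avoid multiple positions in same base asset
--     new_base = new_symbol.split('/')[0]
--
--     for symbol in active_symbols:
--         existing_base = symbol.split('/')[0]
--         if new_base == existing_base: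
--             return False  # Same base asset
--
--     # Check for highly correlated pairs
--     correlated_pairs = {
--         'BTC': ['BCH', 'BSV'],
--         'ETH': ['ETC', 'LTC'],
--         'ADA': ['DOT', 'ALGO'],
--     }
--
--     for base, correlated in correlated_pairs.items():
--         if new_base == base:
--             for symbol in active_symbols:
--                 if symbol.split('/')[0] in correlated:
--                     return False
--
--     return True
-- ===== SOURCE B (Python) =====
-- def check_correlation_risk(new_symbol, active_symbols):
--     """Different decomposition: a conflict predicate (if-chain encoding the
--     one-directional correlation table) and one single pass over active_symbols."""
--
--     def base(s):
--         return s.split('/')[0]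
--
--     def conflicts(b, nb):
--         # same base asset, or b is one-directionally correlated with nb
--         if b == nb:
--             return True
--         if nb == 'BTC':
--             return b in ('BCH', 'BSV')
--         if nb == 'ETH':
--             return b in ('ETC', 'LTC')
--         if nb == 'ADA':
--             return b in ('DOT', 'ALGO')
--         return False
--
--     nb = base(new_symbol)
--     for symbol in active_symbols:
--         if conflicts(base(symbol), nb):
--             return False
--     return True
-- ===== Notes on version B (the rewrite author's own statement) =====
-- stated objective: alternative
-- what changed: B replaces A's two staged scans over active_symbols plus the dict.items() iteration by a conflict predicate (an if-chain encoding the one-directional correlation table) and one single pass that stops at the first conflicting base.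
import Mathlib
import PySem

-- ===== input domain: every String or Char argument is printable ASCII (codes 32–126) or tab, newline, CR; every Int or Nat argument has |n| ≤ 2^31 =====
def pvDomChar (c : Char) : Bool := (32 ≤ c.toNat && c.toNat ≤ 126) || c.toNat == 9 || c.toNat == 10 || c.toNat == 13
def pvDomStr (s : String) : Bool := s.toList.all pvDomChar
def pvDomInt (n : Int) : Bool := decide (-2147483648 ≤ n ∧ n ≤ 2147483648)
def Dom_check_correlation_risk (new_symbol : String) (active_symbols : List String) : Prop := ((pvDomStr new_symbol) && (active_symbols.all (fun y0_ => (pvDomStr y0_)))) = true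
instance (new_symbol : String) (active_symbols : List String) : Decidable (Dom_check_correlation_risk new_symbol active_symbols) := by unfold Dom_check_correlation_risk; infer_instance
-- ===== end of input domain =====

-- B replaces A's two staged scans (same-base loop, then the dict.items() correlated loop)
-- by a conflict predicate (an if-chain encoding the correlation table) and one single
-- pass that stops at the first conflicting base.

-- ===== PORT A =====
-- s.split('/')[0]  ('/' is non-empty so split? is some; split never yields [], so the defaults are never used)
def pvBaseA (s : String) : String := PySem.List.pyGetD ((PySem.Str.split? s "/").getD []) 0 ""

-- the literal dict correlated_pairs, an association list in insertion order
def pvCorrPairsA : List (String × List String) :=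
  [("BTC", ["BCH", "BSV"]), ("ETH", ["ETC", "LTC"]), ("ADA", ["DOT", "ALGO"])]

def check_correlation_risk (new_symbol : String) (active_symbols : List String) : Bool :=
  let new_base := pvBaseA new_symbol
  -- first loop: return False on the first symbol with the same base
  if active_symbols.any (fun symbol => new_base == pvBaseA symbol) then false
  -- second loop: over correlated_pairs.items(), inner loop over active_symbols
  else if pvCorrPairsA.any (fun bc =>
            new_base == bc.1 && active_symbols.any (fun symbol => bc.2.contains (pvBaseA symbol)))
  then false
  else true

-- ===== PORT B =====
-- base(s) = s.split('/')[0]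
def pvBaseB (s : String) : String := PySem.List.pyGetD ((PySem.Str.split? s "/").getD []) 0 ""

-- conflicts(b, nb): same base, or b one-directionally correlated with nb (if-chain)
def pvConflicts (b nb : String) : Bool :=
  if b == nb then true
  else if nb == "BTC" then ["BCH", "BSV"].contains b
  else if nb == "ETH" then ["ETC", "LTC"].contains b
  else if nb == "ADA" then ["DOT", "ALGO"].contains b
  else false

-- the single pass: for symbol in active_symbols: return False at the first conflict
def pvScan (syms : List String) (nb : String) : Bool :=
  match syms with
  | [] => true
  | s :: rest => if pvConflicts (pvBaseB s) nb then false else pvScan rest nb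

def check_correlation_risk_alt (new_symbol : String) (active_symbols : List String) : Bool :=
  pvScan active_symbols (pvBaseB new_symbol)

-- ===== PRECONDITION & SPEC =====
def Spec_check_correlation_risk (new_symbol : String) (active_symbols : List String) (out : Bool) : Prop := out = check_correlation_risk_alt new_symbol active_symbols
instance (new_symbol : String) (active_symbols : List String) (out : Bool) : Decidable (Spec_check_correlation_risk new_symbol active_symbols out) := by unfold Spec_check_correlation_risk; infer_instance

-- ===== CLAIM (what is proved, stated in full; the proofs are below) =====
def Claim_equal_check_correlation_risk : Prop := ∀ (new_symbol : String) (active_symbols : List String), Dom_check_correlation_risk new_symbol active_symbols → Spec_check_correlation_risk new_symbol active_symbols (check_correlation_risk new_symbol active_symbols)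

-- ===== LEMMAS AND PROOFS =====

-- the single-pass scan is an `all` over the negated conflict predicate
theorem pv_scan_eq_all (syms : List String) (nb : String) :
    pvScan syms nb = syms.all (fun s => !pvConflicts (pvBaseB s) nb) := by
  induction syms with
  | nil => rfl
  | cons x xs ih =>
    rw [pvScan, List.all_cons, ih]
    cases pvConflicts (pvBaseB x) nb <;> simp

-- a disjunctive predicate under `all` splits into the two scans of A
theorem pv_split (l : List String) (p q : String → Bool) :
    l.all (fun s => !(p s || q s)) = (!(l.any p) && !(l.any q)) := by
  induction l with
  | nil => rfl
  | cons x xs ih =>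
    rw [List.all_cons, List.any_cons, List.any_cons, ih]
    cases p x <;> cases q x <;> cases xs.any p <;> cases xs.any q <;> simp

theorem pv_if_form (a b : Bool) :
    (if a then false else if b then false else true) = (!a && !b) := by
  cases a <;> cases b <;> rfl

-- conflicts = same-base ∨ correlated-with-key, as A's loops test them
theorem pv_conflicts_split (b nb : String) :
    pvConflicts b nb
      = ((nb == b) ||
         (if nb == "BTC" then ["BCH", "BSV"].contains b
          else if nb == "ETH" then ["ETC", "LTC"].contains b
          else if nb == "ADA" then ["DOT", "ALGO"].contains b
          else false)) := by
  unfold pvConflicts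
  rw [show (b == nb) = (nb == b) from by by_cases h : b = nb <;> simp [h, Ne.symm]]
  cases h : (nb == b) <;> simp

theorem check_correlation_risk_eq (ns : String) (as : List String) :
    check_correlation_risk ns as = check_correlation_risk_alt ns as := by
  unfold check_correlation_risk check_correlation_risk_alt
  have hbb : pvBaseB = pvBaseA := rfl
  rw [pv_scan_eq_all, hbb]
  dsimp only
  have hc : (fun s => !pvConflicts (pvBaseA s) (pvBaseA ns))
      = (fun s => !((pvBaseA ns == pvBaseA s) ||
          (if pvBaseA ns == "BTC" then ["BCH", "BSV"].contains (pvBaseA s)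
           else if pvBaseA ns == "ETH" then ["ETC", "LTC"].contains (pvBaseA s)
           else if pvBaseA ns == "ADA" then ["DOT", "ALGO"].contains (pvBaseA s)
           else false))) :=
    funext fun s => by rw [pv_conflicts_split]
  rw [hc, pv_split, pv_if_form]
  -- the first scans coincide syntactically; the dict loop equals the if-chain scan
  have hA2 : (pvCorrPairsA.any fun bc =>
        pvBaseA ns == bc.1 && as.any (fun symbol => bc.2.contains (pvBaseA symbol)))
      = (as.any fun s =>
          (if pvBaseA ns == "BTC" then ["BCH", "BSV"].contains (pvBaseA s)
           else if pvBaseA ns == "ETH" then ["ETC", "LTC"].contains (pvBaseA s)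
           else if pvBaseA ns == "ADA" then ["DOT", "ALGO"].contains (pvBaseA s)
           else false)) := by
    by_cases h1 : pvBaseA ns = "BTC"
    · simp [pvCorrPairsA, h1]
    · by_cases h2 : pvBaseA ns = "ETH"
      · simp [pvCorrPairsA, h2]
      · by_cases h3 : pvBaseA ns = "ADA"
        · simp [pvCorrPairsA, h3]
        · have e1 : (pvBaseA ns == "BTC") = false := beq_eq_false_iff_ne.mpr h1
          have e2 : (pvBaseA ns == "ETH") = false := beq_eq_false_iff_ne.mpr h2
          have e3 : (pvBaseA ns == "ADA") = false := beq_eq_false_iff_ne.mpr h3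
          simp [pvCorrPairsA, e1, e2, e3]
  rw [hA2]

-- ===== VERDICT (by name: the statement is the Claim_ definition above) =====
theorem check_correlation_risk_spec : Claim_equal_check_correlation_risk := by
  intro ns as _
  unfold Spec_check_correlation_risk
  exact check_correlation_risk_eq ns as
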